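-- pv_equiv track=rewrite | github.com/nace-martin/Project-RateEngine | backend/quotes/quote_result_contract.py | aggregate_rate_source
-- ===== SOURCE A (Python) =====
-- from typing import Any, Iterable, Optional
--
-- class QuoteRateSource:
--     DB_TARIFF = "DB_TARIFF"
--     PARTNER_SPOT = "PARTNER_SPOT"
--     MANUAL_OVERRIDE = "MANUAL_OVERRIDE"
--     FALLBACK_RULE = "FALLBACK_RULE"
--     IMPORTED_RATECARD = "IMPORTED_RATECARD"
--     LEGACY_STORED_QUOTE = "LEGACY_STORED_QUOTE"
--     UNKNOWN = "UNKNOWN"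
--
-- RATE_SOURCE_PRIORITY = [
--     QuoteRateSource.MANUAL_OVERRIDE,
--     QuoteRateSource.PARTNER_SPOT,
--     QuoteRateSource.FALLBACK_RULE,
--     QuoteRateSource.IMPORTED_RATECARD,
--     QuoteRateSource.DB_TARIFF,
--     QuoteRateSource.LEGACY_STORED_QUOTE,
--     QuoteRateSource.UNKNOWN,
-- ]
--
-- def aggregate_rate_source(line_items: Iterable[dict[str, Any]], engine_version: Optional[str] = None) -> str:
--     sources = {
--         str(item.get("rate_source") or "").strip().upper()
--         for item in line_items
--         if item.get("rate_source")
--     }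
--     if not sources:
--         return QuoteRateSource.LEGACY_STORED_QUOTE if engine_version and str(engine_version).upper() != "V4" else QuoteRateSource.UNKNOWN
--     for candidate in RATE_SOURCE_PRIORITY:
--         if candidate in sources:
--             return candidate
--     return QuoteRateSource.UNKNOWN
-- ===== SOURCE B (Python) =====
-- from typing import Any, Iterable, Optional
--
-- class QuoteRateSource:
--     DB_TARIFF = "DB_TARIFF"
--     PARTNER_SPOT = "PARTNER_SPOT"
--     MANUAL_OVERRIDE = "MANUAL_OVERRIDE"
--     FALLBACK_RULE = "FALLBACK_RULE"
--     IMPORTED_RATECARD = "IMPORTED_RATECARD"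
--     LEGACY_STORED_QUOTE = "LEGACY_STORED_QUOTE"
--     UNKNOWN = "UNKNOWN"
--
-- RATE_SOURCE_PRIORITY = [
--     QuoteRateSource.MANUAL_OVERRIDE,
--     QuoteRateSource.PARTNER_SPOT,
--     QuoteRateSource.FALLBACK_RULE,
--     QuoteRateSource.IMPORTED_RATECARD,
--     QuoteRateSource.DB_TARIFF,
--     QuoteRateSource.LEGACY_STORED_QUOTE,
--     QuoteRateSource.UNKNOWN,
-- ]
--
-- PRIO_IDX = {src: i for i, src in enumerate(RATE_SOURCE_PRIORITY)}
--
-- def aggregate_rate_source(line_items: Iterable[dict[str, Any]], engine_version: Optional[str] = None) -> str: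
--     saw_source = False
--     best_idx = None
--     for item in line_items:
--         rs = item.get("rate_source")
--         if not rs:
--             continue
--         saw_source = True
--         idx = PRIO_IDX.get(str(rs).strip().upper())
--         if idx is not None and (best_idx is None or idx < best_idx):
--             best_idx = idx
--     if not saw_source:
--         return QuoteRateSource.LEGACY_STORED_QUOTE if engine_version and str(engine_version).upper() != "V4" else QuoteRateSource.UNKNOWN
--     if best_idx is None:
--         return QuoteRateSource.UNKNOWN
--     return RATE_SOURCE_PRIORITY[best_idx]
-- ===== Notes on version B (the rewrite author's own statement) =====
-- stated objective: alternative
-- what changed: Replaces the set comprehension plus ordered priority scan by a single-pass argmin over a precomputed source-to-priority index table, tracking 'any truthy source seen' and the best index separately.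
import Mathlib
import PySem

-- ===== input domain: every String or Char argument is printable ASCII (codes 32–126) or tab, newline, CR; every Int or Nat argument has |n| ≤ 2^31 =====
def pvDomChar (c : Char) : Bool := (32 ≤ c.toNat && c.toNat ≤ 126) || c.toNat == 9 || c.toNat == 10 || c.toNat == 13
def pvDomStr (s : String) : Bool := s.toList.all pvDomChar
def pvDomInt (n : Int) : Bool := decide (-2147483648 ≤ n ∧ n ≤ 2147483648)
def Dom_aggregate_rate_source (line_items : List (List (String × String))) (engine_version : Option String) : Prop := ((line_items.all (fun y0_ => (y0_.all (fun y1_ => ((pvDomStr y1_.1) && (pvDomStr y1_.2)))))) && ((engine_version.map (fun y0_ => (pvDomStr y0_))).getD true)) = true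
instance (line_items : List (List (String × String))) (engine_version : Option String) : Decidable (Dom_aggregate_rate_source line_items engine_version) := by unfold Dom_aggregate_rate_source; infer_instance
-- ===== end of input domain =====

-- B replaces A's set comprehension + ordered priority scan by one argmin pass over a
-- source→priority-index table (objective: alternative decomposition, same cost).

-- ===== PORT A =====
def RATE_SOURCE_PRIORITY : List String :=
  ["MANUAL_OVERRIDE", "PARTNER_SPOT", "FALLBACK_RULE", "IMPORTED_RATECARD",
   "DB_TARIFF", "LEGACY_STORED_QUOTE", "UNKNOWN"]

-- A's 'for candidate in RATE_SOURCE_PRIORITY: if candidate in sources: return candidate'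
def pvScanPriority : List String → PySem.Set String → String
  | [], _ => "UNKNOWN"
  | c :: cs, s => if PySem.Set.contains s c then c else pvScanPriority cs s

def aggregate_rate_source (line_items : List (List (String × String))) (engine_version : Option String) : String :=
  let sources : PySem.Set String := line_items.foldl (fun s item =>
    match (PySem.Dict.mk item).get? "rate_source" with
    | some v => if v ≠ "" then PySem.Set.add s (PySem.Str.upper (PySem.Str.strip v)) else s
    | none => s) PySem.Set.empty
  if sources = [] then
    match engine_version with
    | some ev => if ev ≠ "" && PySem.Str.upper ev ≠ "V4" then "LEGACY_STORED_QUOTE" else "UNKNOWN"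
    | none => "UNKNOWN"
  else pvScanPriority RATE_SOURCE_PRIORITY sources

-- ===== PORT B =====
def PRIO_IDX : PySem.Dict String Nat := PySem.Dict.mk
  [("MANUAL_OVERRIDE", 0), ("PARTNER_SPOT", 1), ("FALLBACK_RULE", 2), ("IMPORTED_RATECARD", 3),
   ("DB_TARIFF", 4), ("LEGACY_STORED_QUOTE", 5), ("UNKNOWN", 6)]

def aggregate_rate_source_alt (line_items : List (List (String × String))) (engine_version : Option String) : String :=
  let st : Bool × Option Nat := line_items.foldl (fun st item =>
    match (PySem.Dict.mk item).get? "rate_source" with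
    | some v =>
        if v ≠ "" then
          (true,
            match PRIO_IDX.get? (PySem.Str.upper (PySem.Str.strip v)) with
            | some i =>
                match st.2 with
                | none => some i
                | some m => if i < m then some i else some m
            | none => st.2)
        else st
    | none => st) (false, none)
  if st.1 = false then
    match engine_version with
    | some ev => if ev ≠ "" && PySem.Str.upper ev ≠ "V4" then "LEGACY_STORED_QUOTE" else "UNKNOWN"
    | none => "UNKNOWN"
  else
    match st.2 with
    | none => "UNKNOWN"
    | some i => RATE_SOURCE_PRIORITY.getD i "UNKNOWN"

-- ===== PRECONDITION & SPEC =====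
def Spec_aggregate_rate_source (line_items : List (List (String × String))) (engine_version : Option String) (out : String) : Prop := out = aggregate_rate_source_alt line_items engine_version
instance (line_items : List (List (String × String))) (engine_version : Option String) (out : String) : Decidable (Spec_aggregate_rate_source line_items engine_version out) := by unfold Spec_aggregate_rate_source; infer_instance

-- ===== CLAIM (what is proved, stated in full; the proofs are below) =====
def Claim_equal_aggregate_rate_source : Prop := ∀ (line_items : List (List (String × String))) (engine_version : Option String), Dom_aggregate_rate_source line_items engine_version → Spec_aggregate_rate_source line_items engine_version (aggregate_rate_source line_items engine_version)

-- ===== LEMMAS AND PROOFS =====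

-- the normalised source a truthy item contributes (shared characterisation of both loops)
def pvNormOf (item : List (String × String)) : Option String :=
  match (PySem.Dict.mk item).get? "rate_source" with
  | some v => if v ≠ "" then some (PySem.Str.upper (PySem.Str.strip v)) else none
  | none => none

def pvPrioIdx (v : String) : Option Nat := PRIO_IDX.get? v

-- B's loop body on one contributed source
def pvStep2 (st : Bool × Option Nat) (v : String) : Bool × Option Nat :=
  (true,
    match pvPrioIdx v with
    | some i =>
        match st.2 with
        | none => some i
        | some m => if i < m then some i else some m
    | none => st.2)

theorem pvStepA_eq (s : PySem.Set String) (x : List (String × String)) :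
    (match (PySem.Dict.mk x).get? "rate_source" with
      | some v => if v ≠ "" then PySem.Set.add s (PySem.Str.upper (PySem.Str.strip v)) else s
      | none => s)
    = match pvNormOf x with
      | some w => PySem.Set.add s w
      | none => s := by
  unfold pvNormOf
  cases h : (PySem.Dict.mk x).get? "rate_source" with
  | none => rfl
  | some v => by_cases hv : v = "" <;> simp [hv]

theorem pvStepB_eq (st : Bool × Option Nat) (x : List (String × String)) :
    (match (PySem.Dict.mk x).get? "rate_source" with
      | some v =>
          if v ≠ "" then
            (true,
              match PRIO_IDX.get? (PySem.Str.upper (PySem.Str.strip v)) with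
              | some i =>
                  match st.2 with
                  | none => some i
                  | some m => if i < m then some i else some m
              | none => st.2)
          else st
      | none => st)
    = match pvNormOf x with
      | some w => pvStep2 st w
      | none => st := by
  unfold pvNormOf pvStep2 pvPrioIdx
  cases h : (PySem.Dict.mk x).get? "rate_source" with
  | none => rfl
  | some v => by_cases hv : v = "" <;> simp [hv]

theorem pvFoldA' (li : List (List (String × String))) (s : PySem.Set String) :
    li.foldl (fun s item =>
      match pvNormOf item with
      | some w => PySem.Set.add s w
      | none => s) s
    = (li.filterMap pvNormOf).foldl PySem.Set.add s := by
  induction li generalizing s with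
  | nil => rfl
  | cons x t ih =>
      simp only [List.foldl_cons, List.filterMap_cons]
      cases hn : pvNormOf x <;> simp only [List.foldl_cons] <;> exact ih _

theorem pvFoldA (li : List (List (String × String))) (s : PySem.Set String) :
    li.foldl (fun s item =>
      match (PySem.Dict.mk item).get? "rate_source" with
      | some v => if v ≠ "" then PySem.Set.add s (PySem.Str.upper (PySem.Str.strip v)) else s
      | none => s) s
    = (li.filterMap pvNormOf).foldl PySem.Set.add s := by
  exact (PySem.List.foldl_congr_mem' li _
    (fun (s : PySem.Set String) item =>
      match pvNormOf item with
      | some w => PySem.Set.add s w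
      | none => s) s
    (fun x _ s => pvStepA_eq s x)).trans (pvFoldA' li s)

theorem pvFoldB' (li : List (List (String × String))) (st : Bool × Option Nat) :
    li.foldl (fun st item =>
      match pvNormOf item with
      | some w => pvStep2 st w
      | none => st) st
    = (li.filterMap pvNormOf).foldl pvStep2 st := by
  induction li generalizing st with
  | nil => rfl
  | cons x t ih =>
      simp only [List.foldl_cons, List.filterMap_cons]
      cases hn : pvNormOf x <;> simp only [List.foldl_cons] <;> exact ih _

theorem pvFoldB (li : List (List (String × String))) (st : Bool × Option Nat) :
    li.foldl (fun st item =>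
      match (PySem.Dict.mk item).get? "rate_source" with
      | some v =>
          if v ≠ "" then
            (true,
              match PRIO_IDX.get? (PySem.Str.upper (PySem.Str.strip v)) with
              | some i =>
                  match st.2 with
                  | none => some i
                  | some m => if i < m then some i else some m
              | none => st.2)
          else st
      | none => st) st
    = (li.filterMap pvNormOf).foldl pvStep2 st := by
  exact (PySem.List.foldl_congr_mem' li _
    (fun (st : Bool × Option Nat) item =>
      match pvNormOf item with
      | some w => pvStep2 st w
      | none => st) st
    (fun x _ st => pvStepB_eq st x)).trans (pvFoldB' li st)

theorem pvFoldB_fst_true (L : List String) (st : Bool × Option Nat) (h : st.1 = true) :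
    (L.foldl pvStep2 st).1 = true := by
  induction L generalizing st with
  | nil => exact h
  | cons x t ih => exact ih _ rfl

theorem pvFoldB_snd (L : List String) (st : Bool × Option Nat) :
    (L.foldl pvStep2 st).2 =
      (L.filterMap pvPrioIdx).foldl (fun b i =>
        match b with
        | none => some i
        | some m => if i < m then some i else some m) st.2 := by
  induction L generalizing st with
  | nil => rfl
  | cons x t ih =>
      simp only [List.foldl_cons, List.filterMap_cons]
      cases h : pvPrioIdx x with
      | none => simpa [pvStep2, h] using ih ⟨true, st.2⟩
      | some i => simpa [pvStep2, h] using ih ⟨true, _⟩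

theorem pvMinFold (J : List Nat) (m : Nat) :
    J.foldl (fun b i =>
        match b with
        | none => some i
        | some m => if i < m then some i else some m) (some m)
    = some (J.foldl min m) := by
  induction J generalizing m with
  | nil => rfl
  | cons x t ih =>
      by_cases h : x < m
      · simp only [List.foldl_cons, if_pos h, ih]
        rw [Nat.min_eq_right h.le]
      · simp only [List.foldl_cons, if_neg h, ih]
        rw [Nat.min_eq_left (Nat.le_of_not_lt h)]

theorem pvMinFold_none (J : List Nat) :
    J.foldl (fun b i =>
        match b with
        | none => some i
        | some m => if i < m then some i else some m) none
    = J.min? := by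
  cases J with
  | nil => rfl
  | cons x t => simpa [List.min?] using pvMinFold t x

theorem pvPrioIdx_some (v : String) (i : Nat) (h : pvPrioIdx v = some i) :
    i < 7 ∧ v = RATE_SOURCE_PRIORITY.getD i "UNKNOWN" := by
  simp only [pvPrioIdx, PRIO_IDX, PySem.Dict.get?_mk_cons, beq_iff_eq] at h
  split_ifs at h
  all_goals first
    | (cases h; refine ⟨by omega, ?_⟩; simp_all [RATE_SOURCE_PRIORITY])
    | (simp [PySem.Dict.get?, List.find?] at h)

theorem pvPrioIdx_at (i : Nat) (hi : i < 7) :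
    pvPrioIdx (RATE_SOURCE_PRIORITY.getD i "UNKNOWN") = some i := by
  interval_cases i <;> decide

theorem pvScan_eq (L : List String) :
    pvScanPriority RATE_SOURCE_PRIORITY (PySem.Set.ofList L) =
      match (L.filterMap pvPrioIdx).min? with
      | none => "UNKNOWN"
      | some i => RATE_SOURCE_PRIORITY.getD i "UNKNOWN" := by
  have hmemJ : ∀ i, i ∈ L.filterMap pvPrioIdx ↔ (i < 7 ∧ RATE_SOURCE_PRIORITY.getD i "UNKNOWN" ∈ L) := by
    intro i
    constructor
    · intro h
      rcases List.mem_filterMap.mp h with ⟨v, hv, hpv⟩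
      rcases pvPrioIdx_some v i hpv with ⟨hi, rfl⟩
      exact ⟨hi, hv⟩
    · rintro ⟨hi, hmem⟩
      exact List.mem_filterMap.mpr ⟨_, hmem, pvPrioIdx_at i hi⟩
  cases hmin : (L.filterMap pvPrioIdx).min? with
  | none =>
      have hJ := List.min?_eq_none_iff.mp hmin
      have hnot : ∀ i, i < 7 → RATE_SOURCE_PRIORITY.getD i "UNKNOWN" ∉ L := by
        intro i hi hmem
        have := (hmemJ i).mpr ⟨hi, hmem⟩
        simp [hJ] at this
      have h0 := hnot 0 (by omega); have h1 := hnot 1 (by omega)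
      have h2 := hnot 2 (by omega); have h3 := hnot 3 (by omega)
      have h4 := hnot 4 (by omega); have h5 := hnot 5 (by omega)
      have h6 := hnot 6 (by omega)
      simp [RATE_SOURCE_PRIORITY] at h0 h1 h2 h3 h4 h5 h6
      simp [pvScanPriority, RATE_SOURCE_PRIORITY, h0, h1, h2, h3, h4, h5, h6]
  | some m =>
      rcases List.min?_eq_some_iff.mp hmin with ⟨hmJ, hmin_le⟩
      rcases (hmemJ m).mp hmJ with ⟨hm7, hmemL⟩
      have hnot : ∀ j, j < m → RATE_SOURCE_PRIORITY.getD j "UNKNOWN" ∉ L := by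
        intro j hj hmem
        have hjJ := (hmemJ j).mpr ⟨by omega, hmem⟩
        have := hmin_le j hjJ
        omega
      have n : ∀ j, j < m → ∀ c, c = RATE_SOURCE_PRIORITY.getD j "UNKNOWN" → c ∉ L := by
        rintro j hj c rfl; exact hnot j hj
      interval_cases m
      · have hm : "MANUAL_OVERRIDE" ∈ L := by simpa [RATE_SOURCE_PRIORITY] using hmemL
        simp [pvScanPriority, RATE_SOURCE_PRIORITY, hm]
      · have n0 : "MANUAL_OVERRIDE" ∉ L := n 0 (by omega) _ (by simp [RATE_SOURCE_PRIORITY])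
        have hm : "PARTNER_SPOT" ∈ L := by simpa [RATE_SOURCE_PRIORITY] using hmemL
        simp [pvScanPriority, RATE_SOURCE_PRIORITY, n0, hm]
      · have n0 : "MANUAL_OVERRIDE" ∉ L := n 0 (by omega) _ (by simp [RATE_SOURCE_PRIORITY])
        have n1 : "PARTNER_SPOT" ∉ L := n 1 (by omega) _ (by simp [RATE_SOURCE_PRIORITY])
        have hm : "FALLBACK_RULE" ∈ L := by simpa [RATE_SOURCE_PRIORITY] using hmemL
        simp [pvScanPriority, RATE_SOURCE_PRIORITY, n0, n1, hm]
      · have n0 : "MANUAL_OVERRIDE" ∉ L := n 0 (by omega) _ (by simp [RATE_SOURCE_PRIORITY])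
        have n1 : "PARTNER_SPOT" ∉ L := n 1 (by omega) _ (by simp [RATE_SOURCE_PRIORITY])
        have n2 : "FALLBACK_RULE" ∉ L := n 2 (by omega) _ (by simp [RATE_SOURCE_PRIORITY])
        have hm : "IMPORTED_RATECARD" ∈ L := by simpa [RATE_SOURCE_PRIORITY] using hmemL
        simp [pvScanPriority, RATE_SOURCE_PRIORITY, n0, n1, n2, hm]
      · have n0 : "MANUAL_OVERRIDE" ∉ L := n 0 (by omega) _ (by simp [RATE_SOURCE_PRIORITY])
        have n1 : "PARTNER_SPOT" ∉ L := n 1 (by omega) _ (by simp [RATE_SOURCE_PRIORITY])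
        have n2 : "FALLBACK_RULE" ∉ L := n 2 (by omega) _ (by simp [RATE_SOURCE_PRIORITY])
        have n3 : "IMPORTED_RATECARD" ∉ L := n 3 (by omega) _ (by simp [RATE_SOURCE_PRIORITY])
        have hm : "DB_TARIFF" ∈ L := by simpa [RATE_SOURCE_PRIORITY] using hmemL
        simp [pvScanPriority, RATE_SOURCE_PRIORITY, n0, n1, n2, n3, hm]
      · have n0 : "MANUAL_OVERRIDE" ∉ L := n 0 (by omega) _ (by simp [RATE_SOURCE_PRIORITY])
        have n1 : "PARTNER_SPOT" ∉ L := n 1 (by omega) _ (by simp [RATE_SOURCE_PRIORITY])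
        have n2 : "FALLBACK_RULE" ∉ L := n 2 (by omega) _ (by simp [RATE_SOURCE_PRIORITY])
        have n3 : "IMPORTED_RATECARD" ∉ L := n 3 (by omega) _ (by simp [RATE_SOURCE_PRIORITY])
        have n4 : "DB_TARIFF" ∉ L := n 4 (by omega) _ (by simp [RATE_SOURCE_PRIORITY])
        have hm : "LEGACY_STORED_QUOTE" ∈ L := by simpa [RATE_SOURCE_PRIORITY] using hmemL
        simp [pvScanPriority, RATE_SOURCE_PRIORITY, n0, n1, n2, n3, n4, hm]
      · have n0 : "MANUAL_OVERRIDE" ∉ L := n 0 (by omega) _ (by simp [RATE_SOURCE_PRIORITY])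
        have n1 : "PARTNER_SPOT" ∉ L := n 1 (by omega) _ (by simp [RATE_SOURCE_PRIORITY])
        have n2 : "FALLBACK_RULE" ∉ L := n 2 (by omega) _ (by simp [RATE_SOURCE_PRIORITY])
        have n3 : "IMPORTED_RATECARD" ∉ L := n 3 (by omega) _ (by simp [RATE_SOURCE_PRIORITY])
        have n4 : "DB_TARIFF" ∉ L := n 4 (by omega) _ (by simp [RATE_SOURCE_PRIORITY])
        have n5 : "LEGACY_STORED_QUOTE" ∉ L := n 5 (by omega) _ (by simp [RATE_SOURCE_PRIORITY])
        simp [pvScanPriority, RATE_SOURCE_PRIORITY, n0, n1, n2, n3, n4, n5]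

theorem pvOfList_eq_nil (L : List String) : PySem.Set.ofList L = [] ↔ L = [] := by
  constructor
  · intro h
    rcases L with _ | ⟨x, t⟩
    · rfl
    · exfalso
      have : x ∈ PySem.Set.ofList (x :: t) := (PySem.Set.mem_ofList _ _).mpr (by simp)
      simp [h] at this
  · rintro rfl; rfl

-- ===== VERDICT (by name: the statement is the Claim_ definition above) =====
theorem aggregate_rate_source_spec : Claim_equal_aggregate_rate_source := by
  intro li ev _
  unfold Spec_aggregate_rate_source aggregate_rate_source aggregate_rate_source_alt
  rw [pvFoldA, pvFoldB]
  cases hL : li.filterMap pvNormOf with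
  | nil => simp
  | cons x t =>
      rw [show (PySem.Set.empty : PySem.Set String) = [] from rfl]
      have hfst : ((x :: t).foldl pvStep2 (false, none)).1 = true := by
        rw [List.foldl_cons]; exact pvFoldB_fst_true t _ rfl
      have hne : (x :: t).foldl PySem.Set.add ([] : PySem.Set String) ≠ [] := by
        intro h
        have h2 := pvOfList_eq_nil (x :: t)
        rw [PySem.Set.ofList_eq_foldl] at h2
        exact absurd (h2.mp h) (by simp)
      rw [if_neg hne]
      simp only [hfst]
      rw [if_neg (by decide)]
      rw [pvFoldB_snd, pvMinFold_none]
      have hscan := pvScan_eq (x :: t)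
      rw [PySem.Set.ofList_eq_foldl] at hscan
      rw [hscan]
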